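-- pv_equiv track=rewrite | github.com/map-research/AutoMLM | src/MultiLevelModelAnalyzer.py | _is_surjective
-- ===== SOURCE A (Python) =====
-- def _is_surjective(a, b):
--     # Step 1: Ensure both lists have the same length
--     if len(a) != len(b):
--         return False
--
--     # establish a set
--     c = {}
--
--     # iterate over every attr
--     for i in range(len(a)):
--         # if the slot value is already in the set ...
--         if a[i] in c.keys():
--             # ... it has to be the same value as before
--             if c[a[i]] == b[i]:
--                 # if so thats fine
--                 pass
--             else:
--                 # if not .. we dont have a surjective relation
--                 return False
--         else:
--             # if the slot value did not occur yet, it will be added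
--             c[a[i]] = b[i]
--
--     return True
-- ===== SOURCE B (Python) =====
-- def _is_surjective(a, b):
--     # Sort-then-scan: order the (slot, value) pairs by slot so equal slots
--     # become adjacent, then a single adjacent-pair scan detects any conflict.
--     if len(a) != len(b):
--         return False
--     pairs = sorted(zip(a, b), key=lambda p: p[0])
--     for (k1, v1), (k2, v2) in zip(pairs, pairs[1:]):
--         if k1 == k2 and v1 != v2:
--             return False
--     return True
-- ===== Notes on version B (the rewrite author's own statement) =====
-- stated objective: alternative
-- what changed: A's one-pass first-seen dict with interleaved membership test / compare / insert is replaced by sort-then-scan: sort the (slot, value) pairs by slot so equal slots are adjacent, then scan adjacent pairs for a conflicting value.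
import Mathlib
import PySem

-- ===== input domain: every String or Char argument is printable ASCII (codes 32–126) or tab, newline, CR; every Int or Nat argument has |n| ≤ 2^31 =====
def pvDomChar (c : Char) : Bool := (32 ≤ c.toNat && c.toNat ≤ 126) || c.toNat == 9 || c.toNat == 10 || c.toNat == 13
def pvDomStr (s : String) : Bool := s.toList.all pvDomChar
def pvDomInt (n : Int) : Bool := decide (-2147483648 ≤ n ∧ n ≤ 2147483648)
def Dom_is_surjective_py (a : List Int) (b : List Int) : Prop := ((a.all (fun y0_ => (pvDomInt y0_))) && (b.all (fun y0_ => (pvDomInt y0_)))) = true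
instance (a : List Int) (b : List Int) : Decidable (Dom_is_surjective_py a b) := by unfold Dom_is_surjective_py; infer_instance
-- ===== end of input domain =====

-- B replaces A's one-pass first-seen dict by a different algorithm: sort the
-- (slot, value) pairs by slot, then scan adjacent pairs for a conflict.

-- ===== PORT A =====
-- the loop 'for i in range(len(a))' reads a[i] and b[i] in step; once the length
-- check has passed it is transcribed as lockstep recursion over both lists.
-- 'a[i] in c.keys()' + the 'c[a[i]]' lookup are rendered by one 'match c.get? k'.
def isSurjLoopA (c : PySem.Dict Int Int) : List Int → List Int → Bool
  | [], _ => true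
  | _ :: _, [] => true
  | k :: ka, v :: va =>
    match c.get? k with
    | some w => if w == v then isSurjLoopA c ka va else false
    | none => isSurjLoopA (c.insert k v) ka va

def is_surjective_py (a : List Int) (b : List Int) : Bool :=
  if a.length ≠ b.length then false
  else isSurjLoopA PySem.Dict.empty a b

-- ===== PORT B =====
-- the 'for … in zip(pairs, pairs[1:])' loop with early return, as recursion
def scanAdjB : List ((Int × Int) × (Int × Int)) → Bool
  | [] => true
  | (p, q) :: t => if p.1 == q.1 && !(p.2 == q.2) then false else scanAdjB t

def is_surjective_py_alt (a : List Int) (b : List Int) : Bool :=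
  if a.length ≠ b.length then false
  else
    let pairs := PySem.List.sorted (a.zip b) (fun p => p.1) false
    scanAdjB (pairs.zip (PySem.List.slice pairs (some 1) none))

-- ===== PRECONDITION & SPEC =====
def Spec_is_surjective_py (a : List Int) (b : List Int) (out : Bool) : Prop := out = is_surjective_py_alt a b
instance (a : List Int) (b : List Int) (out : Bool) : Decidable (Spec_is_surjective_py a b out) := by unfold Spec_is_surjective_py; infer_instance

-- ===== CLAIM (what is proved, stated in full; the proofs are below) =====
def Claim_equal_is_surjective_py : Prop := ∀ (a : List Int) (b : List Int), Dom_is_surjective_py a b → Spec_is_surjective_py a b (is_surjective_py a b)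

-- ===== LEMMAS AND PROOFS =====

-- the mapping relation both programs decide: equal slots force equal values
def FunRel (p q : Int × Int) : Prop := p.1 = q.1 → p.2 = q.2

-- 'the zipped list is a functional relation'
def Functional (l : List (Int × Int)) : Prop := ∀ p ∈ l, ∀ q ∈ l, FunRel p q

-- ---- A-side characterisation (first-occurrence lookup) ----

theorem lookup_cons_self (k : Int) (v : Int) (t : List (Int × Int)) :
    List.lookup k ((k, v) :: t) = some v := by
  simp

theorem lookup_cons_ne (k pk : Int) (pv : Int) (t : List (Int × Int)) (h : k ≠ pk) :
    List.lookup k ((pk, pv) :: t) = List.lookup k t := by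
  simp [List.lookup_cons, beq_eq_false_iff_ne.mpr h]

theorem orLookup_cons_insert (c : PySem.Dict Int Int) (k v pk : Int) (t : List (Int × Int))
    (ho : c.get? k = none) :
    (c.get? pk).or (List.lookup pk ((k, v) :: t)) = ((c.insert k v).get? pk).or (List.lookup pk t) := by
  by_cases hk : pk = k
  · subst hk
    rw [lookup_cons_self, PySem.Dict.get?_insert_self, ho]; simp [Option.or]
  · rw [lookup_cons_ne _ _ _ _ hk, PySem.Dict.get?_insert_of_ne _ _ hk]

theorem orLookup_cons_bound (c : PySem.Dict Int Int) (k v pk : Int) (t : List (Int × Int)) (w : Int)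
    (ho : c.get? k = some w) :
    (c.get? pk).or (List.lookup pk ((k, v) :: t)) = (c.get? pk).or (List.lookup pk t) := by
  by_cases hk : pk = k
  · subst hk; rw [ho]; simp [Option.or]
  · rw [lookup_cons_ne _ _ _ _ hk]

-- A's loop succeeds iff every pair's value equals the dict's binding if present,
-- else the first occurrence of its key in the zipped list
theorem isSurjLoopA_iff (ka va : List Int) (c : PySem.Dict Int Int) :
    isSurjLoopA c ka va = true ↔
      ∀ p ∈ ka.zip va, (c.get? p.1).or ((ka.zip va).lookup p.1) = some p.2 := by
  induction ka generalizing va c with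
  | nil => simp [isSurjLoopA]
  | cons k ka ih =>
    cases va with
    | nil => simp [isSurjLoopA]
    | cons v va =>
      simp only [List.zip_cons_cons, List.mem_cons, forall_eq_or_imp]
      rcases ho : c.get? k with _ | w
      · simp only [isSurjLoopA, ho, ih]
        constructor
        · intro h
          refine ⟨by rw [lookup_cons_self]; simp [Option.or], fun p hp => ?_⟩
          rw [orLookup_cons_insert c k v p.1 _ ho]; exact h p hp
        · rintro ⟨h0, h⟩ p hp
          rw [← orLookup_cons_insert c k v p.1 _ ho]; exact h p hp
      · simp only [isSurjLoopA, ho]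
        by_cases hw : w = v
        · subst hw
          simp only [BEq.rfl, if_true, ih]
          constructor
          · intro h
            refine ⟨by simp [Option.or], fun p hp => ?_⟩
            rw [orLookup_cons_bound c k w p.1 _ w ho]; exact h p hp
          · rintro ⟨h0, h⟩ p hp
            rw [← orLookup_cons_bound c k w p.1 _ w ho]; exact h p hp
        · have hbv : (w == v) = false := beq_eq_false_iff_ne.mpr hw
          rw [if_neg (by simp [hbv])]
          constructor
          · intro h; simp at h
          · rintro ⟨h0, -⟩
            simp [Option.or] at h0
            exact absurd h0 hw

-- the first-occurrence characterisation is exactly functionality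
theorem functional_lookup (l : List (Int × Int)) (hf : Functional l) :
    ∀ p ∈ l, l.lookup p.1 = some p.2 := by
  induction l with
  | nil => intro p hp; simp at hp
  | cons q t ih =>
    intro p hp
    obtain ⟨qk, qv⟩ := q
    by_cases hk : p.1 = qk
    · rw [hk, lookup_cons_self]
      have := hf (qk, qv) (by simp) p hp (by simpa using hk.symm)
      simp [← this]
    · rw [lookup_cons_ne _ _ _ _ hk]
      have hpt : p ∈ t := by
        rcases List.mem_cons.mp hp with h | h
        · exact absurd (by simp [h]) hk
        · exact h
      exact ih (fun x hx y hy => hf x (List.mem_cons_of_mem _ hx) y (List.mem_cons_of_mem _ hy)) p hpt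

theorem lookup_functional (l : List (Int × Int))
    (h : ∀ p ∈ l, l.lookup p.1 = some p.2) : Functional l := by
  intro p hp q hq hk
  have h1 := h p hp
  have h2 := h q hq
  rw [hk] at h1
  rw [h1] at h2
  exact Option.some_injective _ h2

theorem isSurjLoopA_iff_functional (ka va : List Int) :
    isSurjLoopA PySem.Dict.empty ka va = true ↔ Functional (ka.zip va) := by
  rw [isSurjLoopA_iff]
  have he : ∀ k : Int, (PySem.Dict.empty : PySem.Dict Int Int).get? k = none := by
    intro k; rfl
  constructor
  · intro h
    exact lookup_functional _ (fun p hp => by have := h p hp; rwa [he, Option.none_or] at this)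
  · intro h p hp
    rw [he, Option.none_or]
    exact functional_lookup _ h p hp

-- ---- B-side characterisation (adjacent scan on the sorted list) ----

theorem scanAdjB_iff (l : List ((Int × Int) × (Int × Int))) :
    scanAdjB l = true ↔ ∀ pq ∈ l, FunRel pq.1 pq.2 := by
  induction l with
  | nil => simp [scanAdjB]
  | cons pq t ih =>
    obtain ⟨p, q⟩ := pq
    simp only [scanAdjB, List.mem_cons, forall_eq_or_imp]
    by_cases hk : p.1 = q.1
    · by_cases hv : p.2 = q.2
      · rw [if_neg (by simp [hk, hv])]
        simp [ih, FunRel, hv]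
      · rw [if_pos (by simp [hk, hv])]
        exact ⟨fun h => by simp at h, fun h => absurd (h.1 hk) hv⟩
    · rw [if_neg (by simp [beq_eq_false_iff_ne.mpr hk])]
      simp [ih, FunRel, hk]

-- adjacent agreement on a key-sorted list gives full pairwise agreement
theorem pairwise_of_adjacent (l : List (Int × Int))
    (hs : l.Pairwise (fun p q => p.1 ≤ q.1))
    (ha : ∀ pq ∈ l.zip l.tail, FunRel pq.1 pq.2) : l.Pairwise FunRel := by
  induction l with
  | nil => exact List.Pairwise.nil
  | cons p t ih =>
    rcases List.pairwise_cons.mp hs with ⟨hple, hst⟩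
    cases t with
    | nil => simp
    | cons q0 t' =>
      have hzip : (p :: q0 :: t').zip ((p :: q0 :: t').tail)
          = (p, q0) :: ((q0 :: t').zip ((q0 :: t').tail)) := by simp
      rw [hzip] at ha
      have hpq0 : FunRel p q0 := ha (p, q0) (by simp)
      have hat : ∀ pq ∈ (q0 :: t').zip ((q0 :: t').tail), FunRel pq.1 pq.2 :=
        fun pq hpq => ha pq (List.mem_cons_of_mem _ hpq)
      have hpt : (q0 :: t').Pairwise FunRel := ih hst hat
      refine List.pairwise_cons.mpr ⟨?_, hpt⟩
      intro q hq hk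
      rcases List.mem_cons.mp hq with h | h
      · subst h; exact hpq0 hk
      · -- q ∈ t' : keys nondecreasing force q0.1 = p.1, chain through q0
        have h1 : p.1 ≤ q0.1 := hple q0 (by simp)
        have h2 : q0.1 ≤ q.1 := (List.pairwise_cons.mp hst).1 q h
        have hq0k : q0.1 = p.1 := le_antisymm (by omega) (by omega)
        have hpv : p.2 = q0.2 := hpq0 hq0k.symm
        have hqv : q0.2 = q.2 :=
          (List.pairwise_cons.mp hpt).1 q h (by omega)
        exact hpv.trans hqv

theorem adjacent_of_pairwise (l : List (Int × Int)) (hp : l.Pairwise FunRel) :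
    ∀ pq ∈ l.zip l.tail, FunRel pq.1 pq.2 := by
  induction l with
  | nil => intro pq hpq; simp at hpq
  | cons p t ih =>
    rcases List.pairwise_cons.mp hp with ⟨hph, hpt⟩
    cases t with
    | nil => intro pq hpq; simp at hpq
    | cons q0 t' =>
      intro pq hpq
      have hzip : (p :: q0 :: t').zip ((p :: q0 :: t').tail)
          = (p, q0) :: ((q0 :: t').zip ((q0 :: t').tail)) := by simp
      rw [hzip] at hpq
      rcases List.mem_cons.mp hpq with h | h
      · subst h; exact hph q0 (by simp)
      · exact ih hpt pq h

theorem funRel_symm : Symmetric FunRel := by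
  intro p q h hk
  exact (h hk.symm).symm

theorem pairwise_iff_functional (l : List (Int × Int)) :
    l.Pairwise FunRel ↔ Functional l := by
  constructor
  · intro hp x hx y hy
    exact List.Pairwise.forall_of_forall funRel_symm (fun z _ _ => rfl) hp hx hy
  · intro hf
    induction l with
    | nil => exact List.Pairwise.nil
    | cons p t ih =>
      refine List.pairwise_cons.mpr ⟨fun q hq => hf p (by simp) q (List.mem_cons_of_mem _ hq), ?_⟩
      exact ih (fun x hx y hy => hf x (List.mem_cons_of_mem _ hx) y (List.mem_cons_of_mem _ hy))

theorem functional_sorted_iff (l : List (Int × Int)) :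
    Functional (PySem.List.sorted l (fun p => p.1) false) ↔ Functional l := by
  constructor <;> intro h p hp q hq <;>
    exact h p (by simp [PySem.List.mem_sorted] at *; assumption)
           q (by simp [PySem.List.mem_sorted] at *; assumption)

theorem altLoop_iff_functional (l : List (Int × Int)) :
    scanAdjB ((PySem.List.sorted l (fun p => p.1) false).zip
        (PySem.List.slice (PySem.List.sorted l (fun p => p.1) false) (some 1) none)) = true
      ↔ Functional l := by
  rw [PySem.List.slice_from_one, scanAdjB_iff, ← functional_sorted_iff]
  constructor
  · intro h
    exact (pairwise_iff_functional _).mp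
      (pairwise_of_adjacent _ (PySem.List.sorted_pairwise l (fun p => p.1)) h)
  · intro h
    exact adjacent_of_pairwise _ ((pairwise_iff_functional _).mpr h)

-- ===== VERDICT (by name: the statement is the Claim_ definition above) =====
theorem is_surjective_py_spec : Claim_equal_is_surjective_py := by
  intro a b _
  unfold Spec_is_surjective_py is_surjective_py is_surjective_py_alt
  by_cases hl : a.length = b.length
  · simp only [hl, ne_eq, not_true_eq_false, if_false]
    have hA := isSurjLoopA_iff_functional a b
    have hB := altLoop_iff_functional (a.zip b)
    rcases hA' : isSurjLoopA PySem.Dict.empty a b with _ | _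
    · rcases hB' : scanAdjB ((PySem.List.sorted (a.zip b) (fun p => p.1) false).zip
          (PySem.List.slice (PySem.List.sorted (a.zip b) (fun p => p.1) false) (some 1) none)) with _ | _
      · rfl
      · exact absurd (hA.mpr (hB.mp hB')) (by simp [hA'])
    · exact (hB.mpr (hA.mp hA')).symm
  · simp [hl]
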